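-- pv_equiv track=rewrite | github.com/JNLei/Braille-Algorithm | release/python_lib/alphaToSignal.py | numbers_handler
-- ===== SOURCE A (Python) =====
-- NUMBER = chr(10300)  # ⠼
--
-- LETTER = chr(10288)
--
-- def numbers_handler(word):
--     # Replace each group of numbers in a word to their respective braille representation.
--     if word == "":
--         return word
--     result = word[0]
--     if word[0].isdigit():
--         result = NUMBER + word[0]
--     for i in range(1, len(word)):
--         if word[i].isdigit() and word[i-1].isdigit():
--             result += word[i]
--         elif word[i].isdigit():
--             result += NUMBER + word[i]
--         elif not word[i].isdigit() and word[i-1].isdigit():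
--             result += LETTER + word[i]
--         else:
--             result += word[i]
--     return result
-- ===== SOURCE B (Python) =====
-- NUMBER = chr(10300)  # brvbar number sign
-- LETTER = chr(10288)  # letter sign
--
-- def _take_run(chars, d):
--     # longest prefix of chars whose characters' isdigit() equals d, and the rest
--     k = 0
--     while k < len(chars) and chars[k].isdigit() == d:
--         k += 1
--     return chars[:k], chars[k:]
--
-- def numbers_handler(word):
--     # Split the word into maximal runs of digits / non-digits and prefix each run:
--     # NUMBER before a digit run, LETTER before a non-digit run that follows a digit run.
--     pieces = []
--     rest = word
--     prev_digit = False
--     while rest: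
--         d = rest[0].isdigit()
--         tail_run, rest2 = _take_run(rest[1:], d)
--         run = rest[0] + tail_run
--         if d:
--             pieces.append(NUMBER + run)
--         elif prev_digit:
--             pieces.append(LETTER + run)
--         else:
--             pieces.append(run)
--         prev_digit = d
--         rest = rest2
--     return ''.join(pieces)
-- ===== Notes on version B (the rewrite author's own statement) =====
-- stated objective: alternative
-- what changed: B splits the word into maximal digit/non-digit runs with an explicit run-extraction helper and prefixes whole runs, instead of A's single index loop comparing each character with its predecessor.
import Mathlib
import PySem

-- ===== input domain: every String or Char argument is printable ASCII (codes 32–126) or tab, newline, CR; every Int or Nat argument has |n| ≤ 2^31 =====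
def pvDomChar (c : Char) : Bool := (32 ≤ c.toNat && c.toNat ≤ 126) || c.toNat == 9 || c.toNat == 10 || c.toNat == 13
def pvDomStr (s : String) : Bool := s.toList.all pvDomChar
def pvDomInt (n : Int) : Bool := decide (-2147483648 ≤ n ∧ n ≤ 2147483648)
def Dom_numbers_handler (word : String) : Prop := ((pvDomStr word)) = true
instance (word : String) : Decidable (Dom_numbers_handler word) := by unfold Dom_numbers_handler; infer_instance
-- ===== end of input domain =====

-- B prefixes maximal digit/non-digit runs found by an explicit run-splitting helper, instead of A's
-- per-index loop comparing each character with its predecessor (objective: alternative; same result).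

def pvNUMBER : Char := Char.ofNat 10300  -- ⠼
def pvLETTER : Char := Char.ofNat 10288  -- ⠰

-- ===== PORT A =====
def numbers_handler (word : String) : String :=
  let cs := word.toList
  if cs = [] then word
  else
    let c0 := PySem.List.pyGetD cs 0 ' '
    let result : List Char :=
      if PySem.Chars.isdigit c0 then [pvNUMBER, c0] else [c0]
    String.ofList ((PySem.List.pyRange 1 (PySem.List.len cs) 1).foldl
      (fun res i =>
        let ci := PySem.List.pyGetD cs i ' '
        let cp := PySem.List.pyGetD cs (i - 1) ' '
        if PySem.Chars.isdigit ci && PySem.Chars.isdigit cp then res ++ [ci]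
        else if PySem.Chars.isdigit ci then res ++ [pvNUMBER, ci]
        else if !(PySem.Chars.isdigit ci) && PySem.Chars.isdigit cp then res ++ [pvLETTER, ci]
        else res ++ [ci]) result)

-- ===== PORT B =====
-- run-splitting recursion: each step takes the maximal run of the head's digit-kind (Source B's _take_run)
def pvGroups : List Char → Bool → List Char
  | [], _ => []
  | c :: t, prevDigit =>
    let d := PySem.Chars.isdigit c
    let run := c :: t.takeWhile (fun x => PySem.Chars.isdigit x == d)
    let rest := t.dropWhile (fun x => PySem.Chars.isdigit x == d)
    (if d then pvNUMBER :: run else if prevDigit then pvLETTER :: run else run) ++ pvGroups rest d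
termination_by cs => cs.length
decreasing_by
  exact Nat.lt_succ_of_le (List.length_dropWhile_le _ _)

def numbers_handler_alt (word : String) : String :=
  String.ofList (pvGroups word.toList false)

-- ===== PRECONDITION & SPEC =====
def Spec_numbers_handler (word : String) (out : String) : Prop := out = numbers_handler_alt word
instance (word : String) (out : String) : Decidable (Spec_numbers_handler word out) := by unfold Spec_numbers_handler; infer_instance

-- ===== CLAIM (what is proved, stated in full; the proofs are below) =====
def Claim_equal_numbers_handler : Prop := ∀ (word : String), Dom_numbers_handler word → Spec_numbers_handler word (numbers_handler word)

-- ===== LEMMAS AND PROOFS =====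

-- reference recursion: emit one character given whether the previous character was a digit
def pvEmit (c : Char) (p : Bool) : List Char :=
  if PySem.Chars.isdigit c && p then [c]
  else if PySem.Chars.isdigit c then [pvNUMBER, c]
  else if !(PySem.Chars.isdigit c) && p then [pvLETTER, c]
  else [c]

def pvAux : List Char → Bool → List Char
  | [], _ => []
  | c :: t, p => pvEmit c p ++ pvAux t (PySem.Chars.isdigit c)

theorem pvGetD_cons_succ (l : List Char) (c : Char) (j : Int) (hj : 0 ≤ j) (d : Char) :
    PySem.List.pyGetD (c :: l) (j + 1) d = PySem.List.pyGetD l j d := by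
  obtain ⟨n, rfl⟩ := Int.eq_ofNat_of_zero_le hj
  have : ((n : Int) + 1) = ((n + 1 : Nat) : Int) := by push_cast; ring
  rw [this, PySem.List.pyGetD_natCast, PySem.List.pyGetD_natCast]
  rfl

theorem pvRange_shift (a b : Int) :
    PySem.List.pyRange (a + 1) (b + 1) 1 = (PySem.List.pyRange a b 1).map (· + 1) := by
  rw [PySem.List.pyRange_one, PySem.List.pyRange_one, List.map_map]
  have hb : (b + 1 - (a + 1)) = b - a := by ring
  rw [hb]
  apply List.map_congr_left
  intro k _
  simp
  ring

theorem pvA_loop (t : List Char) (c : Char) (init : List Char) :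
    (PySem.List.pyRange 1 (PySem.List.len (c :: t)) 1).foldl
      (fun res i =>
        let ci := PySem.List.pyGetD (c :: t) i ' '
        let cp := PySem.List.pyGetD (c :: t) (i - 1) ' '
        if PySem.Chars.isdigit ci && PySem.Chars.isdigit cp then res ++ [ci]
        else if PySem.Chars.isdigit ci then res ++ [pvNUMBER, ci]
        else if !(PySem.Chars.isdigit ci) && PySem.Chars.isdigit cp then res ++ [pvLETTER, ci]
        else res ++ [ci]) init
    = init ++ pvAux t (PySem.Chars.isdigit c) := by
  induction t generalizing c init with
  | nil =>
    have h1 : PySem.List.len ([c]) = 1 := by simp [pysem]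
    rw [h1, PySem.List.pyRange_one_eq_nil (by omega)]
    simp [pvAux]
  | cons x t' ih =>
    have hn : PySem.List.len (c :: x :: t') = (t'.length : Int) + 2 := by
      simp [pysem]; omega
    rw [hn, PySem.List.pyRange_one_cons (by omega)]
    rw [List.foldl_cons]
    have hshift : PySem.List.pyRange (1 + 1) ((t'.length : Int) + 2) 1
        = (PySem.List.pyRange 1 ((t'.length : Int) + 1) 1).map (· + 1) := by
      have := pvRange_shift 1 ((t'.length : Int) + 1)
      simpa using this
    rw [hshift, List.foldl_map]
    rw [PySem.List.foldl_congr_mem _ _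
      (fun res i =>
        let ci := PySem.List.pyGetD (x :: t') i ' '
        let cp := PySem.List.pyGetD (x :: t') (i - 1) ' '
        if PySem.Chars.isdigit ci && PySem.Chars.isdigit cp then res ++ [ci]
        else if PySem.Chars.isdigit ci then res ++ [pvNUMBER, ci]
        else if !(PySem.Chars.isdigit ci) && PySem.Chars.isdigit cp then res ++ [pvLETTER, ci]
        else res ++ [ci]) _ ?_]
    · have hlen : ((t'.length : Int) + 1) = PySem.List.len (x :: t') := by simp [pysem]
      rw [hlen, ih x]
      have hc1 : PySem.List.pyGetD (c :: x :: t') 1 ' ' = x := by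
        simp [pysem]
      have hc0 : PySem.List.pyGetD (c :: x :: t') (1 - 1) ' ' = c := by
        norm_num [pysem]
      simp only [hc1, hc0]
      show (if _ then init ++ [x] else if _ then init ++ [pvNUMBER, x]
        else if _ then init ++ [pvLETTER, x] else init ++ [x]) ++ pvAux t' (PySem.Chars.isdigit x)
        = init ++ pvAux (x :: t') (PySem.Chars.isdigit c)
      have hstep : (if PySem.Chars.isdigit x && PySem.Chars.isdigit c then init ++ [x]
          else if PySem.Chars.isdigit x then init ++ [pvNUMBER, x]
          else if !(PySem.Chars.isdigit x) && PySem.Chars.isdigit c then init ++ [pvLETTER, x]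
          else init ++ [x]) = init ++ pvEmit x (PySem.Chars.isdigit c) := by
        unfold pvEmit
        split_ifs <;> rfl
      rw [hstep]
      simp [pvAux]
    · intro acc i hi
      rw [PySem.List.mem_pyRange_one] at hi
      have h1 : PySem.List.pyGetD (c :: x :: t') (i + 1) ' ' = PySem.List.pyGetD (x :: t') i ' ' :=
        pvGetD_cons_succ _ _ _ (by omega) _
      have h2 : PySem.List.pyGetD (c :: x :: t') (i + 1 - 1) ' ' = PySem.List.pyGetD (x :: t') (i - 1) ' ' := by
        have : i + 1 - 1 = (i - 1) + 1 := by ring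
        rw [this]
        exact pvGetD_cons_succ _ _ _ (by omega) _
      simp only [h1, h2]
  
theorem pvAux_run (run rest : List Char) (d : Bool)
    (h : ∀ x ∈ run, PySem.Chars.isdigit x = d) :
    pvAux (run ++ rest) d = run ++ pvAux rest d := by
  induction run with
  | nil => simp
  | cons x xs ih =>
    have hx : PySem.Chars.isdigit x = d := h x (by simp)
    simp only [List.cons_append, pvAux, hx]
    rw [ih (fun y hy => h y (by simp [hy]))]
    cases d <;> simp [pvEmit, hx]

theorem pvGroups_eq_aux (cs : List Char) (p : Bool)
    (h : ∀ c t, cs = c :: t → p = true → PySem.Chars.isdigit c = false) :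
    pvGroups cs p = pvAux cs p := by
  induction hn : cs.length using Nat.strong_induction_on generalizing cs p with
  | _ n ihn =>
    match cs with
    | [] => simp [pvGroups, pvAux]
    | c :: t =>
      subst hn
      have hd : ∀ x ∈ t.takeWhile (fun x => PySem.Chars.isdigit x == PySem.Chars.isdigit c),
          PySem.Chars.isdigit x = PySem.Chars.isdigit c := by
        intro x hx
        have := List.mem_takeWhile_imp hx
        simpa using this
      have hrec : pvGroups (t.dropWhile (fun x => PySem.Chars.isdigit x == PySem.Chars.isdigit c))
            (PySem.Chars.isdigit c)
          = pvAux (t.dropWhile (fun x => PySem.Chars.isdigit x == PySem.Chars.isdigit c))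
            (PySem.Chars.isdigit c) := by
        apply ihn _ (Nat.lt_succ_of_le (List.length_dropWhile_le _ _)) _ _ _ rfl
        intro c' t' heq hp
        have hne : t.dropWhile (fun x => PySem.Chars.isdigit x == PySem.Chars.isdigit c) ≠ [] := by
          rw [heq]; simp
        have hhd := List.head_dropWhile_not (fun x => PySem.Chars.isdigit x == PySem.Chars.isdigit c)
          (l := t) hne
        have hheadc : (t.dropWhile (fun x => PySem.Chars.isdigit x == PySem.Chars.isdigit c)).head hne = c' := by
          simp [heq]
        rw [hheadc, hp] at hhd
        by_contra hcontra
        simp at hcontra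
        rw [hcontra] at hhd
        simp at hhd
      have haux : pvAux (c :: t) p = pvEmit c p
          ++ (t.takeWhile (fun x => PySem.Chars.isdigit x == PySem.Chars.isdigit c)
              ++ pvAux (t.dropWhile (fun x => PySem.Chars.isdigit x == PySem.Chars.isdigit c))
                (PySem.Chars.isdigit c)) := by
        conv_lhs => rw [pvAux]
        rw [← pvAux_run _ _ _ hd, List.takeWhile_append_dropWhile]
      rw [haux, pvGroups, hrec]
      have hemit : (if PySem.Chars.isdigit c then
            pvNUMBER :: (c :: t.takeWhile (fun x => PySem.Chars.isdigit x == PySem.Chars.isdigit c))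
          else if p then
            pvLETTER :: (c :: t.takeWhile (fun x => PySem.Chars.isdigit x == PySem.Chars.isdigit c))
          else c :: t.takeWhile (fun x => PySem.Chars.isdigit x == PySem.Chars.isdigit c))
          = pvEmit c p ++ t.takeWhile (fun x => PySem.Chars.isdigit x == PySem.Chars.isdigit c) := by
        by_cases hdig : PySem.Chars.isdigit c
        · have hp : p = false := by
            by_contra hp'
            simp at hp'
            exact absurd hdig (by simp [h c t rfl hp'])
          simp [hdig, hp, pvEmit]
        · cases p <;> simp [hdig, pvEmit]
      rw [hemit]
      simp
  
-- ===== VERDICT (by name: the statement is the Claim_ definition above) =====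
theorem numbers_handler_spec : Claim_equal_numbers_handler := by
  intro word _
  show numbers_handler word = numbers_handler_alt word
  unfold numbers_handler numbers_handler_alt
  cases hcs : word.toList with
  | nil =>
    have hw : word = String.ofList [] := by
      rw [← String.ofList_toList (s := word), hcs]
    simp only [hw, pvGroups]
    simp
  | cons c t =>
    simp only [hcs]
    have hc0 : PySem.List.pyGetD (c :: t) 0 ' ' = c := by simp [pysem]
    rw [hc0]
    have hres : (if PySem.Chars.isdigit c then [pvNUMBER, c] else [c]) = pvEmit c false := by
      cases hdig : PySem.Chars.isdigit c <;> simp [pvEmit, hdig]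
    rw [hres, pvA_loop]
    rw [pvGroups_eq_aux _ _ (by intro c' t' _ hp; cases hp)]
    rw [pvAux]
    rw [if_neg (by simp : ¬(c :: t = []))]
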